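-- pv_equiv track=rewrite | github.com/plexicus/vulnrank | curator/preprocess.py | _strip_boilerplate
-- ===== SOURCE A (Python) =====
-- def _strip_boilerplate(text: str) -> str:
--     """Remove license headers, copyright notices, and blank-line runs."""
--     lines = text.splitlines()
--     cleaned = []
--     skip_next = 0
--     for line in lines:
--         if skip_next > 0:
--             skip_next -= 1
--             continue
--         stripped = line.strip()
--         if any(kw in stripped.lower() for kw in ["copyright", "license", "spdx", "apache", "mit license"]):
--             continue
--         if not stripped and cleaned and not cleaned[-1]:
--             continue  # collapse double blank lines
--         cleaned.append(line)
--     return "\n".join(cleaned)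
-- ===== SOURCE B (Python) =====
-- def _strip_boilerplate(text: str) -> str:
--     """Remove license headers, copyright notices, and blank-line runs."""
--     keywords = ("copyright", "license", "spdx", "apache")
--     lines = [ln for ln in text.splitlines()
--              if not any(kw in ln.strip().lower() for kw in keywords)]
--     out = []
--     i = 0
--     while i < len(lines):
--         out.append(lines[i])
--         i += 1
--         if not lines[i - 1].strip():
--             while i < len(lines) and not lines[i].strip():
--                 i += 1
--     return "\n".join(out)
-- ===== Notes on version B (the rewrite author's own statement) =====
-- stated objective: simpler
-- what changed: Replaces A's single stateful loop (with its dead skip_next counter and last-kept-line sentinel check) by two separate passes: a filter comprehension dropping boilerplate-keyword lines, then a run-based pass that keeps each blank run's first line and skips the rest of the run.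
-- intended difference: On texts whose non-boilerplate lines contain two adjacent blank lines the first of which is whitespace-only but non-empty, A in general keeps both blanks (its blank-collapse check only fires when the previously kept line is literally empty), while B keeps only the first blank line of each run, which is the blank-run collapse the docstring intends. — e.g. on _strip_boilerplate(" \n \nx"): A returns " \n \nx", B returns " \nx"
import Mathlib
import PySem

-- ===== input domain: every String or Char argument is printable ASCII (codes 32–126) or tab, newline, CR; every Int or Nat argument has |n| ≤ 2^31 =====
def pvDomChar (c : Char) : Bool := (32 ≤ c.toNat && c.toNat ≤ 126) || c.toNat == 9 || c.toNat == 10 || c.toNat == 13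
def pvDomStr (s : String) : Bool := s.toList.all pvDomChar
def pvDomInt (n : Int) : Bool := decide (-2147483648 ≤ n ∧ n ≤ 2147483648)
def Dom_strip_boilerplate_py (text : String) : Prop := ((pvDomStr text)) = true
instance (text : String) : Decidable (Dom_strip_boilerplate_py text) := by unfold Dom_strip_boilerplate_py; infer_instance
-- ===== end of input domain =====

-- B filters boilerplate lines in one pass, then collapses each blank run to its first line in a
-- second, run-based pass (simpler decomposition; drops A's dead skip_next counter and the
-- redundant fifth keyword). B intentionally collapses runs that start with a whitespace-only
-- line, which A fails to collapse (see D_ below).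

-- ===== PORT A =====
def pvKwsA : List String := ["copyright", "license", "spdx", "apache", "mit license"]

-- A's keyword test: any boilerplate keyword occurs in the stripped, lowercased line
def pvIsBoiler (line : String) : Bool :=
  pvKwsA.any (fun kw => PySem.Str.isIn kw (PySem.Str.lower (PySem.Str.strip line)))

-- 'not line.strip()': the line strips to the empty string
def pvBlank (line : String) : Bool := PySem.Str.strip line = ""

def pvStepA (st : List String × Int) (line : String) : List String × Int :=
  if st.2 > 0 then (st.1, st.2 - 1)
  else
    if pvIsBoiler line then st
    else if pvBlank line ∧ st.1 ≠ [] ∧ st.1.getLast? = some "" then st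
    else (st.1 ++ [line], st.2)

def strip_boilerplate_py (text : String) : String :=
  PySem.Str.join "\n" ((PySem.Str.splitlines text).foldl pvStepA ([], 0)).1

-- ===== PORT B =====
def pvKwsB : List String := ["copyright", "license", "spdx", "apache"]

def pvKeepB (line : String) : Bool :=
  !(pvKwsB.any (fun kw => PySem.Str.isIn kw (PySem.Str.lower (PySem.Str.strip line))))

-- Source B's loops: the outer while emits the current line (pvCollapse); after a blank line the
-- inner while skips the rest of its blank run (pvSkip).
mutual
def pvCollapse : List String → List String
  | [] => []
  | l :: rest => if pvBlank l then l :: pvSkip rest else l :: pvCollapse rest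
  termination_by structural l => l
def pvSkip : List String → List String
  | [] => []
  | l :: rest => if pvBlank l then pvSkip rest else l :: pvCollapse rest
  termination_by structural l => l
end

def strip_boilerplate_py_alt (text : String) : String :=
  PySem.Str.join "\n" (pvCollapse ((PySem.Str.splitlines text).filter pvKeepB))

-- ===== PRECONDITION & SPEC =====
-- On texts whose non-boilerplate lines contain two adjacent blank lines the first of which is
-- whitespace-only but non-empty, A in general keeps both (its blank-collapse check only fires
-- when the previously kept line is literally empty), while B keeps just the first blank line of
-- each blank run — the collapse the docstring intends.
def D_strip_boilerplate_py (text : String) : Prop :=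
  (let k := (PySem.Str.splitlines text).filter (!pvIsBoiler ·)
   (("." :: k).zip (k.zip k.tail)).any
     fun q => !pvBlank q.1 && pvBlank q.2.1 && q.2.1 != "" && pvBlank q.2.2) = true
instance (text : String) : Decidable (D_strip_boilerplate_py text) := by
  unfold D_strip_boilerplate_py; infer_instance

def Spec_strip_boilerplate_py (text : String) (out : String) : Prop :=
  ¬ D_strip_boilerplate_py text → out = strip_boilerplate_py_alt text
instance (text : String) (out : String) : Decidable (Spec_strip_boilerplate_py text out) := by
  unfold Spec_strip_boilerplate_py; infer_instance

def pvDiffWitness_strip_boilerplate_py : String := " \n \nx"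
def pvDiffWitnessOut_strip_boilerplate_py : String × String := (" \n \nx", " \nx")

-- ===== CLAIM (what is proved, stated in full; the proofs are below) =====
def Claim_unchanged_strip_boilerplate_py : Prop :=
  ∀ (text : String), Dom_strip_boilerplate_py text → Spec_strip_boilerplate_py text (strip_boilerplate_py text)
def Claim_changed_strip_boilerplate_py : Prop :=
  Dom_strip_boilerplate_py (pvDiffWitness_strip_boilerplate_py) ∧
  D_strip_boilerplate_py (pvDiffWitness_strip_boilerplate_py) ∧
  strip_boilerplate_py (pvDiffWitness_strip_boilerplate_py) = pvDiffWitnessOut_strip_boilerplate_py.1 ∧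
  strip_boilerplate_py_alt (pvDiffWitness_strip_boilerplate_py) = pvDiffWitnessOut_strip_boilerplate_py.2 ∧
  pvDiffWitnessOut_strip_boilerplate_py.1 ≠ pvDiffWitnessOut_strip_boilerplate_py.2
def Claim_exact_strip_boilerplate_py : Prop :=
  ∀ (text : String), Dom_strip_boilerplate_py text → D_strip_boilerplate_py text →
    strip_boilerplate_py text ≠ strip_boilerplate_py_alt text

-- ===== LEMMAS AND PROOFS =====

-- D_'s condition as a scan with a flag remembering whether the previous line was blank
def pvHasBadAux : Bool → List String → Bool
  | _, [] => false
  | prev, l :: rest =>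
    (pvBlank l && !prev && l != "" && (rest.head?.elim false pvBlank))
      || pvHasBadAux (pvBlank l) rest

def pvHasBad (kept : List String) : Bool := pvHasBadAux false kept

lemma hasBadAux_zip (p : String) (k : List String) :
    ((p :: k).zip (k.zip k.tail)).any
        (fun q => !pvBlank q.1 && pvBlank q.2.1 && q.2.1 != "" && pvBlank q.2.2)
      = pvHasBadAux (pvBlank p) k := by
  induction k generalizing p with
  | nil => rfl
  | cons l t ih =>
    match t with
    | [] =>
      rw [pvHasBadAux]
      simp [pvHasBadAux]
    | y :: t' =>
      rw [pvHasBadAux]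
      have := ih l
      simp only [List.zip_cons_cons, List.tail_cons, List.any_cons] at this ⊢
      rw [this]
      simp only [Option.elim, List.head?]
      cases pvBlank l <;> cases pvBlank p <;> cases pvBlank y <;> cases hle : l == "" <;> simp

-- A's collapse loop, isolated: append unless the line strips empty and the last kept line is "".
def pvCollA (acc : List String) : List String → List String
  | [] => acc
  | l :: rest =>
    if pvBlank l ∧ acc ≠ [] ∧ acc.getLast? = some "" then pvCollA acc rest
    else pvCollA (acc ++ [l]) rest

-- A's collapse expressed run by run: a blank run survives through its first literally-empty line.
def pvCollapseA : List String → List String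
  | [] => []
  | l :: rest =>
    if pvBlank l = false then l :: pvCollapseA rest
    else
      let run := l :: rest.takeWhile pvBlank
      let rest' := rest.dropWhile pvBlank
      (if "" ∈ run then run.take (run.idxOf "" + 1) else run) ++ pvCollapseA rest'
termination_by l => l.length
decreasing_by
  · simp
  · have := List.length_dropWhile_le pvBlank rest
    simp; omega

-- A's keyword test agrees with B's: "mit license" in s already implies "license" in s.
lemma kw_eq (s : String) : pvIsBoiler s = !(pvKeepB s) := by
  have h : PySem.Str.isIn "mit license" (PySem.Str.lower (PySem.Str.strip s)) = true →
      PySem.Str.isIn "license" (PySem.Str.lower (PySem.Str.strip s)) = true := by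
    intro h
    rw [PySem.Str.isIn_iff_infix] at h ⊢
    exact List.IsInfix.trans (by decide) h
  simp only [pvIsBoiler, pvKwsA, pvKwsB, pvKeepB, List.any, Bool.not_not]
  cases hb : PySem.Str.isIn "license" (PySem.Str.lower (PySem.Str.strip s)) <;>
    cases he : PySem.Str.isIn "mit license" (PySem.Str.lower (PySem.Str.strip s)) <;>
      simp_all

lemma keep_eq : (fun l => !pvIsBoiler l) = pvKeepB := by
  funext s
  rw [kw_eq, Bool.not_not]

-- A's fold never sets skip_next and skips keyword lines without touching the state.
lemma foldA_eq (lines : List String) (acc : List String) :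
    lines.foldl pvStepA (acc, 0) = (pvCollA acc (lines.filter pvKeepB), 0) := by
  induction lines generalizing acc with
  | nil => simp [pvCollA]
  | cons l rest ih =>
    simp only [List.foldl_cons, List.filter_cons]
    cases hk : pvKeepB l with
    | false =>
      have hA : pvIsBoiler l = true := by
        rw [kw_eq, hk]; rfl
      have hstep : pvStepA (acc, 0) l = (acc, 0) := by
        simp only [pvStepA]
        rw [if_neg (by norm_num), if_pos hA]
      rw [hstep, ih]
      simp
    | true =>
      have hA : pvIsBoiler l = false := by
        rw [kw_eq, hk]; rfl
      by_cases hc : pvBlank l ∧ acc ≠ [] ∧ acc.getLast? = some ""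
      · have hstep : pvStepA (acc, 0) l = (acc, 0) := by
          simp only [pvStepA]
          rw [if_neg (by norm_num), if_neg (by simpa using hA), if_pos (by simpa using hc)]
        rw [hstep, ih]
        simp [pvCollA, hc]
      · have hstep : pvStepA (acc, 0) l = (acc ++ [l], 0) := by
          simp only [pvStepA]
          rw [if_neg (by norm_num), if_neg (by simpa using hA), if_neg (by simpa using hc)]
        rw [hstep, ih]
        simp [pvCollA, hc]

-- skipping: after a kept literally-empty line, the rest of a blank run is dropped entirely
lemma collA_skip (run : List String) (acc rest' : List String)
    (hb : ∀ x ∈ run, pvBlank x = true) (hne : acc ≠ []) (hl : acc.getLast? = some "") :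
    pvCollA acc (run ++ rest') = pvCollA acc rest' := by
  induction run with
  | nil => simp
  | cons x run ih =>
    have hx : pvBlank x := hb x (by simp)
    simp only [List.cons_append, pvCollA]
    rw [if_pos ⟨hx, hne, hl⟩]
    exact ih (fun y hy => hb y (by simp [hy]))

-- a whole blank run: A keeps its prefix through the first literally-empty line
lemma collA_run (run : List String) (acc rest' : List String)
    (hb : ∀ x ∈ run, pvBlank x = true) (hl : acc.getLast? ≠ some "") :
    pvCollA acc (run ++ rest')
      = pvCollA (acc ++ (if "" ∈ run then run.take (run.idxOf "" + 1) else run)) rest' := by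
  induction run generalizing acc with
  | nil => simp
  | cons l run ih =>
    have hls : pvBlank l := hb l (by simp)
    simp only [List.cons_append, pvCollA]
    rw [if_neg (fun hc => hl hc.2.2)]
    by_cases hle : l = ""
    · subst hle
      rw [collA_skip run (acc ++ [""]) rest' (fun y hy => hb y (by simp [hy]))
            (by simp) (by simp)]
      simp
    · have hlast : (acc ++ [l]).getLast? = some l := by simp
      rw [ih (acc ++ [l]) (fun y hy => hb y (by simp [hy])) (by simp [hlast, hle])]
      by_cases hmem : "" ∈ run
      · have hm2 : "" ∈ l :: run := by simp [hmem]
        rw [if_pos hmem, if_pos hm2]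
        have hidx : (l :: run).idxOf "" = run.idxOf "" + 1 := by
          simp [hle]
        rw [hidx]
        simp [List.take_succ_cons]
      · have hm2 : "" ∉ l :: run := by simp [hle, hmem]
        rw [if_neg hmem, if_neg hm2]
        simp

lemma head?_dropWhile_false (p : String → Bool) (l : List String) (x : String)
    (h : (l.dropWhile p).head? = some x) : p x = false := by
  induction l with
  | nil => simp at h
  | cons a t ih =>
    rw [List.dropWhile_cons] at h
    split at h
    · exact ih h
    · simp_all

lemma strip_empty : PySem.Str.strip "" = "" := by decide

lemma coll_aux (n : Nat) : ∀ (kept acc : List String), kept.length ≤ n →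
    (∀ l, kept.head? = some l → pvBlank l = true → acc.getLast? ≠ some "") →
    pvCollA acc kept = acc ++ pvCollapseA kept := by
  induction n with
  | zero =>
    intro kept acc hlen _
    rw [List.length_eq_zero_iff.mp (Nat.le_zero.mp hlen)]
    simp [pvCollA, pvCollapseA]
  | succ n ih =>
    intro kept acc hlen h
    match kept with
    | [] => simp [pvCollA, pvCollapseA]
    | l :: rest =>
      cases hbl : pvBlank l with
      | false =>
        have hls : ¬ pvBlank l = true := by rw [hbl]; simp
        have hlne : l ≠ "" := fun hc => hls (by rw [hc, pvBlank, strip_empty]; rfl)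
        rw [pvCollA, if_neg (fun hc => hls hc.1)]
        have hcol : pvCollapseA (l :: rest) = l :: pvCollapseA rest := by
          rw [pvCollapseA.eq_def]; simp [hbl]
        rw [hcol]
        rw [ih rest (acc ++ [l]) (by simp at hlen; omega)
              (fun y hy _ => by simp [hlne])]
        simp
      | true =>
        have hlast : acc.getLast? ≠ some "" := h l rfl hbl
        have hdec : l :: rest
            = (l :: rest.takeWhile pvBlank) ++ rest.dropWhile pvBlank := by
          simp [List.takeWhile_append_dropWhile]
        rw [hdec, collA_run _ _ _
              (by
                intro x hx
                rcases List.mem_cons.mp hx with h1 | h2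
                · exact h1 ▸ hbl
                · exact List.mem_takeWhile_imp h2)
              hlast]
        rw [ih (rest.dropWhile pvBlank) _
              (by
                have := List.length_dropWhile_le pvBlank rest
                simp at hlen ⊢; omega)
              (fun y hy hb => by
                rw [head?_dropWhile_false pvBlank rest y hy] at hb; simp at hb)]
        have hcol : pvCollapseA (l :: rest)
            = (if "" ∈ l :: rest.takeWhile pvBlank
                then (l :: rest.takeWhile pvBlank).take ((l :: rest.takeWhile pvBlank).idxOf "" + 1)
                else l :: rest.takeWhile pvBlank) ++ pvCollapseA (rest.dropWhile pvBlank) := by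
          rw [pvCollapseA.eq_def]; simp [hbl]
        rw [← hdec, hcol]
        simp

lemma collA_eq_collapseA (kept : List String) (acc : List String)
    (h : ∀ l, kept.head? = some l → pvBlank l = true → acc.getLast? ≠ some "") :
    pvCollA acc kept = acc ++ pvCollapseA kept :=
  coll_aux kept.length kept acc le_rfl h

-- the inner while is "drop blanks, continue the outer loop"
lemma skip_eq (rest : List String) : pvSkip rest = pvCollapse (rest.dropWhile pvBlank) := by
  induction rest with
  | nil => simp [pvSkip, pvCollapse]
  | cons a t ih =>
    rw [pvSkip, List.dropWhile_cons]
    cases ha : pvBlank a with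
    | true => simpa [ha] using ih
    | false => simp [ha, pvCollapse]

lemma hasBadAux_blanks (run rest' : List String) (hb : ∀ x ∈ run, pvBlank x = true) :
    pvHasBadAux true (run ++ rest') = pvHasBadAux true rest' := by
  induction run with
  | nil => rfl
  | cons x t ih =>
    have hx : pvBlank x = true := hb x (by simp)
    rw [List.cons_append, pvHasBadAux, hx]
    simpa using ih (fun y hy => hb y (by simp [hy]))

lemma hasBadAux_flag (rest' : List String)
    (h : ∀ y, rest'.head? = some y → pvBlank y = false) :
    pvHasBadAux true rest' = pvHasBadAux false rest' := by
  match rest' with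
  | [] => rfl
  | y :: ys =>
    have hy : pvBlank y = false := h y rfl
    rw [pvHasBadAux, pvHasBadAux, hy]
    simp

-- without a bad run, A's run rule keeps exactly the first line of each blank run, i.e. B's rule
lemma collapseA_eq_collapse (n : Nat) : ∀ (kept : List String), kept.length ≤ n →
    pvHasBad kept = false → pvCollapseA kept = pvCollapse kept := by
  induction n with
  | zero =>
    intro kept hlen _
    rw [List.length_eq_zero_iff.mp (Nat.le_zero.mp hlen)]
    simp [pvCollapseA, pvCollapse]
  | succ n ih =>
    intro kept hlen hbad
    match kept with
    | [] => simp [pvCollapseA, pvCollapse]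
    | l :: rest =>
      cases hbl : pvBlank l with
      | false =>
        rw [pvCollapseA.eq_def, pvCollapse]
        simp only [hbl]
        rw [pvHasBad, pvHasBadAux, hbl] at hbad
        simp only [Bool.false_and, Bool.false_or] at hbad
        exact congrArg _ (ih rest (by simp at hlen; omega) hbad)
      | true =>
        rw [pvHasBad, pvHasBadAux, hbl] at hbad
        simp only [Bool.or_eq_false_iff] at hbad
        obtain ⟨hfst, hrest⟩ := hbad
        have hnb : ¬ (l ≠ "" ∧ rest.head?.elim false pvBlank) := by
          intro hc
          rcases hc with ⟨hne, hhd⟩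
          simp [hne, hhd] at hfst
        have hbad' : pvHasBad (rest.dropWhile pvBlank) = false := by
          rw [pvHasBad]
          rw [← hasBadAux_flag _ (fun y hy => head?_dropWhile_false pvBlank rest y hy)]
          rw [← hasBadAux_blanks (rest.takeWhile pvBlank) _
                (fun x hx => List.mem_takeWhile_imp hx)]
          rwa [List.takeWhile_append_dropWhile]
        rw [pvCollapseA.eq_def, pvCollapse]
        simp only [hbl]
        rw [ih (rest.dropWhile pvBlank)
              (by have := List.length_dropWhile_le pvBlank rest; simp at hlen ⊢; omega) hbad']
        rw [skip_eq]
        by_cases hle : l = ""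
        · subst hle
          simp
        · have hhead : rest.head?.elim false pvBlank = false := by
            by_contra hc
            exact hnb ⟨hle, by simpa using hc⟩
          have htw : rest.takeWhile pvBlank = [] := by
            match rest with
            | [] => rfl
            | a :: t =>
              simp only [Option.elim, List.head?] at hhead
              simp [hhead]
          simp [htw, hle]


-- ===== tightness: inside D_ the two results always differ =====

lemma collapseA_blank (l : String) (rest : List String) (hbl : pvBlank l = true) :
    pvCollapseA (l :: rest)
      = (if "" ∈ l :: rest.takeWhile pvBlank
          then (l :: rest.takeWhile pvBlank).take ((l :: rest.takeWhile pvBlank).idxOf "" + 1)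
          else l :: rest.takeWhile pvBlank) ++ pvCollapseA (rest.dropWhile pvBlank) := by
  rw [pvCollapseA.eq_def]
  simp [hbl]

lemma collapseA_nonblank (l : String) (rest : List String) (hbl : pvBlank l = false) :
    pvCollapseA (l :: rest) = l :: pvCollapseA rest := by
  rw [pvCollapseA.eq_def]
  simp [hbl]

lemma run_head (l : String) (tw : List String) :
    ∃ t, (if "" ∈ l :: tw then (l :: tw).take ((l :: tw).idxOf "" + 1) else l :: tw) = l :: t := by
  by_cases hm : "" ∈ l :: tw
  · exact ⟨_, by rw [if_pos hm, List.take_succ_cons]⟩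
  · exact ⟨tw, by rw [if_neg hm]⟩

lemma run_two (l y : String) (tw' : List String) (hl : l ≠ "") :
    2 ≤ (if "" ∈ l :: y :: tw'
          then (l :: y :: tw').take ((l :: y :: tw').idxOf "" + 1)
          else l :: y :: tw').length := by
  by_cases hm : "" ∈ l :: y :: tw'
  · rw [if_pos hm, List.length_take]
    have hidx : (l :: y :: tw').idxOf "" = (y :: tw').idxOf "" + 1 := by simp [hl]
    rw [hidx]
    simp
  · rw [if_neg hm]
    simp

lemma collapse_sublist (n : Nat) : ∀ (kept : List String), kept.length ≤ n →
    List.Sublist (pvCollapse kept) (pvCollapseA kept) := by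
  induction n with
  | zero =>
    intro kept hlen
    rw [List.length_eq_zero_iff.mp (Nat.le_zero.mp hlen)]
    simp [pvCollapse, pvCollapseA]
  | succ n ih =>
    intro kept hlen
    match kept with
    | [] => simp [pvCollapse, pvCollapseA]
    | l :: rest =>
      cases hbl : pvBlank l with
      | false =>
        rw [pvCollapse, hbl, if_neg (by simp), collapseA_nonblank l rest hbl]
        exact (ih rest (by simp at hlen; omega)).cons₂ l
      | true =>
        rw [pvCollapse, hbl, if_pos rfl, skip_eq, collapseA_blank l rest hbl]
        obtain ⟨t, ht⟩ := run_head l (rest.takeWhile pvBlank)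
        rw [ht, List.cons_append]
        refine List.Sublist.cons₂ l ?_
        exact (ih (rest.dropWhile pvBlank)
          (by have := List.length_dropWhile_le pvBlank rest; simp at hlen ⊢; omega)).trans
          (List.sublist_append_right t _)

lemma collapse_len_lt (n : Nat) : ∀ (kept : List String), kept.length ≤ n →
    pvHasBad kept = true → (pvCollapse kept).length < (pvCollapseA kept).length := by
  induction n with
  | zero =>
    intro kept hlen hbad
    rw [List.length_eq_zero_iff.mp (Nat.le_zero.mp hlen)] at hbad
    simp [pvHasBad, pvHasBadAux] at hbad
  | succ n ih =>
    intro kept hlen hbad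
    match kept with
    | [] => simp [pvHasBad, pvHasBadAux] at hbad
    | l :: rest =>
      cases hbl : pvBlank l with
      | false =>
        rw [pvHasBad, pvHasBadAux, hbl] at hbad
        simp only [Bool.false_and, Bool.false_or] at hbad
        rw [pvCollapse, hbl, if_neg (by simp), collapseA_nonblank l rest hbl]
        simp only [List.length_cons]
        have := ih rest (by simp at hlen; omega) hbad
        omega
      | true =>
        rw [pvHasBad, pvHasBadAux, hbl] at hbad
        rw [pvCollapse, hbl, if_pos rfl, skip_eq, collapseA_blank l rest hbl]
        rw [List.length_cons, List.length_append]
        have hlesub : (pvCollapse (rest.dropWhile pvBlank)).length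
            ≤ (pvCollapseA (rest.dropWhile pvBlank)).length :=
          (collapse_sublist (rest.dropWhile pvBlank).length _ le_rfl).length_le
        rcases Bool.or_eq_true _ _ |>.mp hbad with hfst | hrec
        · -- the bad pair sits right here: the run keeps at least two lines in A
          simp only [Bool.and_eq_true] at hfst
          have hne : l ≠ "" := by
            have := hfst.1.2
            simpa using this
          obtain ⟨y, t, rfl⟩ : ∃ y t, rest = y :: t := by
            match rest, hfst.2 with
            | y :: t, _ => exact ⟨y, t, rfl⟩
          have hy : pvBlank y = true := by simpa [List.head?] using hfst.2
          have htw : (y :: t).takeWhile pvBlank = y :: t.takeWhile pvBlank := by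
            simp [hy]
          rw [htw]
          have h2 := run_two l y (t.takeWhile pvBlank) hne
          omega
        · -- the bad pair is further right, beyond this blank run
          have hbad' : pvHasBad (rest.dropWhile pvBlank) = true := by
            rw [pvHasBad]
            rw [← hasBadAux_flag _ (fun y hy => head?_dropWhile_false pvBlank rest y hy)]
            rw [← hasBadAux_blanks (rest.takeWhile pvBlank) _
                  (fun x hx => List.mem_takeWhile_imp hx)]
            rwa [List.takeWhile_append_dropWhile]
          have := ih (rest.dropWhile pvBlank)
            (by have := List.length_dropWhile_le pvBlank rest; simp at hlen ⊢; omega) hbad'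
          obtain ⟨t2, ht2⟩ := run_head l (rest.takeWhile pvBlank)
          rw [ht2]
          simp only [List.length_cons]
          omega

lemma map_sum_le (f : String → Nat) {l1 l2 : List String} (h : List.Sublist l1 l2) :
    (l1.map f).sum ≤ (l2.map f).sum := by
  induction h with
  | slnil => exact le_rfl
  | cons a h ih =>
    simp only [List.map_cons, List.sum_cons]
    omega
  | cons₂ a h ih =>
    simp only [List.map_cons, List.sum_cons]
    omega

lemma map_sum_lt (f : String → Nat) (hf : ∀ y, 1 ≤ f y) {l1 l2 : List String}
    (h : List.Sublist l1 l2) :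
    l1.length < l2.length → (l1.map f).sum < (l2.map f).sum := by
  induction h with
  | slnil => intro hlen; omega
  | cons a h ih =>
    intro _
    have h1 := map_sum_le f h
    have h2 := hf a
    simp only [List.map_cons, List.sum_cons]
    omega
  | cons₂ a h ih =>
    intro hlen
    have := ih (by simpa using hlen)
    simp only [List.map_cons, List.sum_cons]
    omega

lemma join_len : ∀ (xs : List String) (x : String),
    (PySem.Chars.join "\n".toList ((x :: xs).map String.toList)).length + 1
      = ((x :: xs).map (fun s => 1 + s.toList.length)).sum := by
  intro xs
  induction xs with
  | nil =>
    intro x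
    simp [PySem.Chars.join_singleton]
    omega
  | cons b bs ih =>
    intro x
    simp only [List.map_cons]
    rw [PySem.Chars.join_cons_cons]
    have := ih b
    have hsep : ("\n".toList).length = 1 := by decide
    simp only [List.map_cons, List.sum_cons, List.length_append] at this ⊢
    omega

-- ===== VERDICT (by name: the statement is the Claim_ definition above) =====
theorem strip_boilerplate_py_spec : Claim_unchanged_strip_boilerplate_py := by
  intro text _ hD
  unfold D_strip_boilerplate_py at hD
  rw [keep_eq] at hD
  replace hD : pvHasBad ((PySem.Str.splitlines text).filter pvKeepB) = false := by
    have hx : pvBlank "." = false := by decide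
    rw [pvHasBad]
    conv_lhs => rw [← hx, ← hasBadAux_zip]
    rw [Bool.eq_false_iff]
    exact hD
  unfold strip_boilerplate_py strip_boilerplate_py_alt
  rw [foldA_eq]
  rw [collA_eq_collapseA _ [] (by intro l _ _; simp)]
  rw [collapseA_eq_collapse _ _ le_rfl (by simpa using hD)]
  rfl

theorem strip_boilerplate_py_changed : Claim_changed_strip_boilerplate_py := by
  unfold Claim_changed_strip_boilerplate_py; decide

set_option maxHeartbeats 1000000 in
theorem strip_boilerplate_py_tight : Claim_exact_strip_boilerplate_py := by
  intro text _ hd heq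
  unfold D_strip_boilerplate_py at hd
  rw [keep_eq] at hd
  have hx : pvBlank "." = false := by decide
  have hA : strip_boilerplate_py text
      = PySem.Str.join "\n" (pvCollapseA ((PySem.Str.splitlines text).filter pvKeepB)) := by
    unfold strip_boilerplate_py
    rw [foldA_eq, collA_eq_collapseA _ [] (by intro l _ _; simp)]
    rfl
  have hB : strip_boilerplate_py_alt text
      = PySem.Str.join "\n" (pvCollapse ((PySem.Str.splitlines text).filter pvKeepB)) := rfl
  generalize hK : (PySem.Str.splitlines text).filter pvKeepB = k at hd hA hB
  have hbad : pvHasBad k = true := by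
    rw [pvHasBad, ← hx, ← hasBadAux_zip]
    exact hd
  have hlt : (pvCollapse k).length < (pvCollapseA k).length :=
    collapse_len_lt k.length k le_rfl hbad
  have hjoin : PySem.Str.join "\n" (pvCollapseA k) = PySem.Str.join "\n" (pvCollapse k) := by
    rw [← hA, ← hB]
    exact heq
  have hchars : (PySem.Chars.join "\n".toList ((pvCollapseA k).map String.toList)).length
      = (PySem.Chars.join "\n".toList ((pvCollapse k).map String.toList)).length := by
    simpa using congrArg (fun s => s.toList.length) hjoin
  obtain ⟨l0, rest0, hkc⟩ : ∃ l0 rest0, k = l0 :: rest0 := by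
    cases hkk : k with
    | nil =>
      rw [hkk] at hbad
      simp [pvHasBad, pvHasBadAux] at hbad
    | cons a b => exact ⟨a, b, rfl⟩
  obtain ⟨a, la, hla⟩ : ∃ a la, pvCollapseA k = a :: la := by
    cases h : pvCollapseA k with
    | nil => rw [h] at hlt; simp at hlt
    | cons a la => exact ⟨a, la, rfl⟩
  obtain ⟨b, lb, hlb⟩ : ∃ b lb, pvCollapse k = b :: lb := by
    rw [hkc, pvCollapse]
    split
    · exact ⟨l0, _, rfl⟩
    · exact ⟨l0, _, rfl⟩
  have hJA := join_len la a
  rw [← hla] at hJA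
  have hJB := join_len lb b
  rw [← hlb] at hJB
  have hsum := map_sum_lt (fun s => 1 + s.toList.length) (fun y => Nat.le_add_right 1 _)
    (collapse_sublist k.length k le_rfl) hlt
  omega
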